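-- pv_equiv track=rewrite | github.com/senghorn/SecurityProjects | hw2/q25.py | get_caeser_text
-- ===== SOURCE A (Python) =====
-- def get_caeser_text( text, length):
--     characters = [char for char in text];
--     all_sub = []
--     for i in range(length):
--         sub = ""
--         for i in range(i,len(text),length):
--             c = characters[i]
--             sub+=c
--         all_sub.append(sub)
--     return all_sub
-- ===== SOURCE B (Python) =====
-- def get_caeser_text(text, length):
--     if length <= 0:
--         return []
--     all_sub = ["" for _ in range(length)]
--     for idx, ch in enumerate(text):
--         all_sub[idx % length] += ch
--     return all_sub
-- ===== Notes on version B (the rewrite author's own statement) =====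
-- stated objective: alternative
-- what changed: Replaces the per-bucket outer loop with an inner strided index scan by a single linear pass over the text that appends each character to bucket idx % length.
import Mathlib
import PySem

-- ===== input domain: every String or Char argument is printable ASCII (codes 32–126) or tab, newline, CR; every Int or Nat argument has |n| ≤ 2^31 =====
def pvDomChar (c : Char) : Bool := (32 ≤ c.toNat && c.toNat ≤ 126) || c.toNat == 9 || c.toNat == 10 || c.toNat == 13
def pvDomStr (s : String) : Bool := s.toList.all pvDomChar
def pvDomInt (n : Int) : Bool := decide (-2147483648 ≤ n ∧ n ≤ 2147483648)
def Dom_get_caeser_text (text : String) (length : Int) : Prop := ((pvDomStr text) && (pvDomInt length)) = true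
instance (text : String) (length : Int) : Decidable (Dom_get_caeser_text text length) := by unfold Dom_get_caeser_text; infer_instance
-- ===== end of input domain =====

-- B builds the result in one linear pass routing each character to bucket idx % length, instead of A's per-bucket strided scans (alternative decomposition, same cost).

-- ===== PORT A =====
def get_caeser_text (text : String) (length : Int) : List String :=
  let characters := text.toList
  (PySem.List.pyRange 0 length 1).foldl
    (fun all_sub i =>
      let sub := (PySem.List.pyRange i (PySem.Str.len text) length).foldl
        (fun sub j => sub.push (PySem.List.pyGetD characters j ' ')) ""
      all_sub ++ [sub]) []

-- ===== PORT B =====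
def get_caeser_text_alt (text : String) (length : Int) : List String :=
  if length ≤ 0 then []
  else
    (PySem.List.enumerate text.toList 0).foldl
      (fun all_sub p => all_sub.modify (PySem.Int.mod p.1 length).toNat (fun s => s.push p.2))
      (List.replicate length.toNat "")

-- ===== PRECONDITION & SPEC =====
def Spec_get_caeser_text (text : String) (length : Int) (out : List String) : Prop := out = get_caeser_text_alt text length
instance (text : String) (length : Int) (out : List String) : Decidable (Spec_get_caeser_text text length out) := by unfold Spec_get_caeser_text; infer_instance

-- ===== CLAIM (what is proved, stated in full; the proofs are below) =====
def Claim_equal_get_caeser_text : Prop := ∀ (text : String) (length : Int), Dom_get_caeser_text text length → Spec_get_caeser_text text length (get_caeser_text text length)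

-- ===== LEMMAS AND PROOFS =====

-- B's modify-fold, bucket by bucket: bucket i collects exactly the elements routed to key p = i.
theorem pv_foldl_modify_getElem? {β : Type} (key : β → Nat) (g : β → String → String) :
    ∀ (ps : List β) (acc : List String) (i : Nat),
      (ps.foldl (fun a p => a.modify (key p) (g p)) acc)[i]?
        = acc[i]?.map (fun s => (ps.filter (fun p => key p == i)).foldl (fun s p => g p s) s) := by
  intro ps
  induction ps with
  | nil => intro acc i; simp
  | cons p ps ih =>
    intro acc i
    simp only [List.foldl_cons, ih, List.filter_cons]
    by_cases h : key p = i
    · have hb : (key p == i) = true := by simp [h]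
      simp only [if_true, List.getElem?_modify, h]
      cases acc[i]? <;> simp
    · have hb : (key p == i) = false := by simp [h]
      simp only [hb, Bool.false_eq_true, if_false, List.getElem?_modify]
      cases acc[i]? <;> simp [h]

-- the indices j < N with j % n = i, in order, are the arithmetic progression i, i+n, i+2n, …

theorem pv_filter_range_mod (n i : Nat) (hn : 0 < n) (hi : i < n) :
    ∀ (N : Nat),
      (List.range N).filter (fun j => j % n == i)
        = (List.range ((N - i + n - 1) / n)).map (fun k => i + n * k) := by
  intro N
  induction N with
  | zero =>
    rw [Nat.div_eq_of_lt (by omega)]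
    simp
  | succ N ih =>
    rw [List.range_succ, List.filter_append, ih]
    by_cases hNi : N < i
    · have hx : N % n = N := Nat.mod_eq_of_lt (by omega)
      have h1 : (N % n == i) = false := by rw [hx]; simp; omega
      have h2 : (N + 1 - i + n - 1) / n = (N - i + n - 1) / n := by
        rw [Nat.div_eq_of_lt (by omega), Nat.div_eq_of_lt (by omega)]
      simp [h1, h2]
    · push_neg at hNi
      by_cases hm : N % n = i
      · have hq : N = n * (N / n) + i := by conv_lhs => rw [← Nat.div_add_mod N n, hm]
        have hcnt : (N - i + n - 1) / n = N / n := by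
          have e : N - i + n - 1 = n * (N / n) + (n - 1) := by omega
          rw [e, Nat.mul_add_div hn]
          simp [Nat.div_eq_of_lt (show n - 1 < n by omega)]
        have hcnt1 : (N + 1 - i + n - 1) / n = N / n + 1 := by
          have e : N + 1 - i + n - 1 = n * (N / n) + n := by omega
          rw [e, ← Nat.mul_succ, Nat.mul_div_cancel_left _ hn]
        rw [hcnt, hcnt1, List.range_succ, List.map_append]
        simp [hm]
        omega
      · have h1 : (N % n == i) = false := by simp [hm]
        have hd : ¬ n ∣ (N - i + n) := by
          intro hdvd
          obtain ⟨c, hc⟩ := (Nat.dvd_add_self_right).mp hdvd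
          apply hm
          have hN : N = n * c + i := by omega
          rw [hN, Nat.mul_add_mod, Nat.mod_eq_of_lt hi]
        have h2 : (N + 1 - i + n - 1) / n = (N - i + n - 1) / n := by
          have e : N + 1 - i + n - 1 = N - i + n - 1 + 1 := by omega
          rw [e, Nat.succ_div]
          have hnd : ¬ n ∣ (N - i + n - 1 + 1) := by
            intro hdvd
            apply hd
            have e2 : N - i + n - 1 + 1 = N - i + n := by omega
            rwa [e2] at hdvd
          simp [hnd]
        simp [h1, h2]

-- bucket i of the enumerate pass, as a filter of positions (offset s tracked through the induction)

theorem pv_enum_filter (n i : Nat) :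
    ∀ (cs : List Char) (s : Nat),
      ((PySem.List.enumerate cs (s : Int)).filter
          (fun p => (PySem.Int.mod p.1 (n : Int)).toNat == i)).map (fun p => p.2)
        = ((List.range cs.length).filter (fun j => (s + j) % n == i)).map
            (fun j => cs.getD j ' ') := by
  intro cs
  induction cs with
  | nil => intro s; simp [PySem.List.enumerate]
  | cons c cs ih =>
    intro s
    have hs1 : (s : Int) + 1 = ((s + 1 : Nat) : Int) := by push_cast; ring
    have hpred : ((fun j => (s + j) % n == i) ∘ Nat.succ) = (fun j => ((s + 1) + j) % n == i) := by
      funext j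
      have e : s + (j + 1) = (s + 1) + j := by omega
      simp [Function.comp, Nat.succ_eq_add_one, e]
    have hget : ((fun j => (c :: cs).getD j ' ') ∘ Nat.succ) = (fun j => cs.getD j ' ') := by
      funext j; simp [Function.comp]
    have hhead : (PySem.Int.mod (s : Int) (n : Int)).toNat = s % n := by
      rw [PySem.Int.mod_natCast]; omega
    rw [PySem.List.enumerate_cons, hs1]
    simp only [List.filter_cons, List.length_cons, List.range_succ_eq_map, List.filter_map,
      hpred, hhead]
    by_cases h : s % n = i
    · have hb : (s % n == i) = true := by simp [h]
      have hb' : ((s + 0) % n == i) = true := by simp [h]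
      simp only [hb, hb', if_true, List.map_cons, ih (s + 1)]
      simp
    · have hb : (s % n == i) = false := by simp [h]
      have hb' : ((s + 0) % n == i) = false := by simp [h]
      simp only [hb, hb']
      simp only [Bool.false_eq_true, if_false, ih (s + 1)]
      simp

-- ===== VERDICT (by name: the statement is the Claim_ definition above) =====
theorem get_caeser_text_spec : Claim_equal_get_caeser_text := by
  intro text length _
  show get_caeser_text text length = get_caeser_text_alt text length
  unfold get_caeser_text get_caeser_text_alt
  by_cases hl : length ≤ 0
  · simp [PySem.List.pyRange_one_eq_nil hl, hl]
  · push_neg at hl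
    rw [if_neg (by omega)]
    obtain ⟨n, rfl⟩ := Int.eq_ofNat_of_zero_le (le_of_lt hl)
    have hn : 0 < n := by exact_mod_cast hl
    apply List.ext_getElem?
    intro i
    rw [PySem.List.foldl_append_singleton_eq_map, List.nil_append, PySem.List.pyRange_one]
    have htn : ((n : Int) - 0).toNat = n := by omega
    rw [htn]
    rw [show ((n : Int)).toNat = n from rfl]
    rw [show (PySem.List.enumerate text.toList 0) = PySem.List.enumerate text.toList ((0 : Nat) : Int) from rfl]
    rw [pv_foldl_modify_getElem? (fun p : Int × Char => (PySem.Int.mod p.1 ((n : Nat) : Int)).toNat)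
      (fun p s => s.push p.2)]
    rw [List.getElem?_map, List.getElem?_map, List.getElem?_replicate]
    by_cases hi : i < n
    · rw [List.getElem?_range hi, if_pos hi]
      simp only [Option.map_some]
      congr 1
      rw [show ((0 : Int) + (i : Nat)) = ((i : Nat) : Int) by ring]
      have hA : (PySem.List.pyRange ((i : Nat) : Int) (PySem.Str.len text) ((n : Nat) : Int)).foldl
            (fun sub j => sub.push (PySem.List.pyGetD text.toList j ' ')) ""
          = ((PySem.List.pyRange ((i : Nat) : Int) (PySem.Str.len text) ((n : Nat) : Int)).map
            (fun j => PySem.List.pyGetD text.toList j ' ')).foldl String.push "" := by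
        rw [List.foldl_map]
      have hB : ((PySem.List.enumerate text.toList ((0 : Nat) : Int)).filter
            (fun p => (PySem.Int.mod p.1 ((n : Nat) : Int)).toNat == i)).foldl
            (fun s p => s.push p.2) ""
          = (((PySem.List.enumerate text.toList ((0 : Nat) : Int)).filter
            (fun p => (PySem.Int.mod p.1 ((n : Nat) : Int)).toNat == i)).map
            (fun p => p.2)).foldl String.push "" := by
        rw [List.foldl_map]
      rw [hA, hB]
      congr 1
      rw [pv_enum_filter n i text.toList 0]
      have hfix : ∀ j : Nat, ((0 + j) % n == i) = (j % n == i) := by intro j; simp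
      simp only [hfix]
      rw [pv_filter_range_mod n i hn hi text.toList.length]
      have hlen : PySem.Str.len text = (text.toList.length : Int) := by
        simp [PySem.Str.len_eq]
      rw [hlen, PySem.List.pyRange_of_pos _ _ (show (0:Int) < ((n:Nat):Int) by exact_mod_cast hn)]
      have hcount : (if ((i : Nat) : Int) < (text.toList.length : Int)
            then ((((text.toList.length : Nat) : Int) - ((i:Nat):Int) + ((n:Nat):Int) - 1) / ((n : Nat) : Int)).toNat else 0)
          = (text.toList.length - i + n - 1) / n := by
        by_cases hiN : i < text.toList.length
        · rw [if_pos (by exact_mod_cast hiN)]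
          rw [show (((text.toList.length : Nat) : Int) - ((i:Nat):Int) + ((n:Nat):Int) - 1)
              = ((text.toList.length - i + n - 1 : Nat) : Int) by omega]
          rfl
        · rw [if_neg (by push_neg at hiN ⊢; exact_mod_cast hiN)]
          rw [Nat.div_eq_of_lt (by omega)]
      rw [hcount]
      simp only [List.map_map]
      apply List.map_congr_left
      intro k _
      simp only [Function.comp]
      rw [show ((i : Nat) : Int) + ((n : Nat) : Int) * ((k : Nat) : Int)
          = ((i + n * k : Nat) : Int) by push_cast; ring]
      rw [PySem.List.pyGetD_natCast]
    · rw [List.getElem?_eq_none (by simpa using hi), if_neg hi]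
      simp
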